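-- pv_equiv track=rewrite | github.com/Julie921/guideline_prototype_hugo | tools/protocolemodule.py | compare_three_listes
-- ===== SOURCE A (Python) =====
-- def compare_three_listes(liste1, liste2, liste3):
--     difference = []
--     for element in liste1:
--         if element not in liste2 and element not in liste3:
--             difference.append(element)
--     for element in liste2:
--         if element not in liste1 and element not in liste3:
--             difference.append(element)
--     for element in liste3:
--         if element not in liste1 and element not in liste2:
--             difference.append(element)
--     return difference
-- ===== SOURCE B (Python) =====
-- def compare_three_listes(liste1, liste2, liste3):
--     counts = {}
--     for lst in (liste1, liste2, liste3):
--         for x in set(lst):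
--             counts[x] = counts.get(x, 0) + 1
--     return [x for x in liste1 + liste2 + liste3 if counts[x] == 1]
-- ===== Notes on version B (the rewrite author's own statement) =====
-- stated objective: faster
-- what changed: Replaces the three membership-filter loops (each doing linear scans of the other two lists) with a dict counting how many lists contain each distinct element, then one filter pass over the concatenation keeping elements whose count is 1.
import Mathlib
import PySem

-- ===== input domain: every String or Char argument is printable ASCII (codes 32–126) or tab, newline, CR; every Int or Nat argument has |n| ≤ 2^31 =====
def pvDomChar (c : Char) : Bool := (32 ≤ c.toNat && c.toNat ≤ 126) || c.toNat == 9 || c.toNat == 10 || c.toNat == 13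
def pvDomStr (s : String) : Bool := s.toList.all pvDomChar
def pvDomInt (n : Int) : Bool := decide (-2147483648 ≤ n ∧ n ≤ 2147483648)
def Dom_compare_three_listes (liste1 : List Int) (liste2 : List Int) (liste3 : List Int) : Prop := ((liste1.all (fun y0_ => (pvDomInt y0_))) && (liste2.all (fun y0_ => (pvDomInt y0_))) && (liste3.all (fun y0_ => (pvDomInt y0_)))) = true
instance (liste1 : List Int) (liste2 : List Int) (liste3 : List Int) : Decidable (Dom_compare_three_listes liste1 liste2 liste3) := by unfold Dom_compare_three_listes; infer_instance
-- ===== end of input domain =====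

-- B replaces A's three membership-filter loops by a counting dict over the per-list distinct
-- elements plus one filter pass over the concatenation (asymptotically faster).

-- ===== PORT A =====
-- Literal port of A: three loops, each appending elements absent from the other two lists.
def compare_three_listes (liste1 : List Int) (liste2 : List Int) (liste3 : List Int) : List Int :=
  let difference : List Int := []
  let difference := liste1.foldl
    (fun acc element =>
      if !liste2.contains element && !liste3.contains element then acc ++ [element] else acc)
    difference
  let difference := liste2.foldl
    (fun acc element =>
      if !liste1.contains element && !liste3.contains element then acc ++ [element] else acc)
    difference
  let difference := liste3.foldl
    (fun acc element =>
      if !liste1.contains element && !liste2.contains element then acc ++ [element] else acc)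
    difference
  difference

-- ===== PORT B =====
-- B-side helper: 'for x in set(lst): counts[x] = counts.get(x, 0) + 1'
-- (the dict is only looked up afterwards, so Python's set iteration order does not matter)
def pvAddSetCounts (d : PySem.Dict Int Int) (lst : List Int) : PySem.Dict Int Int :=
  (PySem.Set.ofList lst).foldl (fun d x => d.insert x (d.getD x 0 + 1)) d

def compare_three_listes_alt (liste1 : List Int) (liste2 : List Int) (liste3 : List Int) : List Int :=
  let counts := pvAddSetCounts (pvAddSetCounts (pvAddSetCounts PySem.Dict.empty liste1) liste2) liste3
  (liste1 ++ liste2 ++ liste3).filter (fun x => counts.getD x 0 == 1)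

-- ===== PRECONDITION & SPEC =====
def Spec_compare_three_listes (liste1 : List Int) (liste2 : List Int) (liste3 : List Int) (out : List Int) : Prop := out = compare_three_listes_alt liste1 liste2 liste3
instance (liste1 : List Int) (liste2 : List Int) (liste3 : List Int) (out : List Int) : Decidable (Spec_compare_three_listes liste1 liste2 liste3 out) := by unfold Spec_compare_three_listes; infer_instance

-- ===== CLAIM (what is proved, stated in full; the proofs are below) =====
def Claim_equal_compare_three_listes : Prop := ∀ (liste1 : List Int) (liste2 : List Int) (liste3 : List Int), Dom_compare_three_listes liste1 liste2 liste3 → Spec_compare_three_listes liste1 liste2 liste3 (compare_three_listes liste1 liste2 liste3)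

-- ===== LEMMAS AND PROOFS =====

-- a list's distinct-element set counts each member exactly once
theorem pvCount_ofList (l : List Int) (v : Int) :
    (PySem.Set.ofList l).count v = if v ∈ l then 1 else 0 := by
  by_cases h : v ∈ l
  · rw [if_pos h]
    exact List.count_eq_one_of_mem (PySem.Set.nodup_ofList l) ((PySem.Set.mem_ofList l v).2 h)
  · rw [if_neg h]
    exact_mod_cast List.count_eq_zero.2 (fun hm => h ((PySem.Set.mem_ofList l v).1 hm))

theorem pvGetD_addSetCounts (d : PySem.Dict Int Int) (l : List Int) (v : Int) :
    (pvAddSetCounts d l).getD v 0 = d.getD v 0 + (if v ∈ l then 1 else 0) := by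
  rw [pvAddSetCounts, PySem.Dict.getD_foldl_insert_add_one, pvCount_ofList]
  split <;> simp

-- the dict's value at v is the number of the three lists containing v
theorem pvCounts_getD (l1 l2 l3 : List Int) (v : Int) :
    (pvAddSetCounts (pvAddSetCounts (pvAddSetCounts PySem.Dict.empty l1) l2) l3).getD v 0 =
      (if v ∈ l1 then (1:Int) else 0) + (if v ∈ l2 then 1 else 0) + (if v ∈ l3 then 1 else 0) := by
  rw [pvGetD_addSetCounts, pvGetD_addSetCounts, pvGetD_addSetCounts]
  simp [PySem.Dict.empty, PySem.Dict.getD, PySem.Dict.get?]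

theorem pvQ_eq (l1 l2 l3 : List Int) (v : Int) (h1 : v ∈ l1) :
    ((pvAddSetCounts (pvAddSetCounts (pvAddSetCounts PySem.Dict.empty l1) l2) l3).getD v 0 == 1)
      = (!l2.contains v && !l3.contains v) := by
  rw [pvCounts_getD]
  by_cases h2 : v ∈ l2 <;> by_cases h3 : v ∈ l3 <;> simp [h1, h2, h3]

-- ===== VERDICT (by name: the statement is the Claim_ definition above) =====
theorem compare_three_listes_spec : Claim_equal_compare_three_listes := by
  intro l1 l2 l3 _
  show compare_three_listes l1 l2 l3 = compare_three_listes_alt l1 l2 l3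
  unfold compare_three_listes compare_three_listes_alt
  simp only [PySem.List.foldl_append_if_eq_filter, List.nil_append, List.filter_append]
  congr 1
  · congr 1
    · exact (List.filter_congr (fun v hv => pvQ_eq l1 l2 l3 v hv)).symm
    · refine (List.filter_congr (fun v hv => ?_)).symm
      rw [pvCounts_getD]
      by_cases h1 : v ∈ l1 <;> by_cases h3 : v ∈ l3 <;> simp [h1, hv, h3]
  · refine (List.filter_congr (fun v hv => ?_)).symm
    rw [pvCounts_getD]
    by_cases h1 : v ∈ l1 <;> by_cases h2 : v ∈ l2 <;> simp [h1, h2, hv]
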